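-- pv_equiv track=rewrite | github.com/mindsdb/mindsdb_python_sdk | examples/using_mindsdb_llm_inference_with_tools.py | extract_sql_query
-- ===== SOURCE A (Python) =====
-- def extract_sql_query(result):
--     # Split the result into lines
--     lines = result.split('\n')
--
--     # Initialize an empty string to hold the query
--     query = ""
--
--     # Initialize a flag to indicate whether we're currently reading the query
--     reading_query = False
--
--     # Iterate over the lines
--     for line in lines:
--         # If the line starts with "SQLQuery:", start reading the query
--         if line.startswith("SQLQuery:"):
--             query = line[len("SQLQuery:"):].strip()
--             reading_query = True
--         # If the line starts with "SQLResult:", stop reading the query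
--         elif line.startswith("SQLResult:"):
--             break
--         # If we're currently reading the query, append the line to the query
--         elif reading_query:
--             query += " " + line.strip()
--
--     # If no line starts with "SQLQuery:", return None
--     if query == "":
--         return None
--
--     return query
-- ===== SOURCE B (Python) =====
-- def extract_sql_query(result):
--     lines = result.split('\n')
--
--     # Keep only the lines before the first "SQLResult:" line.
--     segment = []
--     for line in lines:
--         if line.startswith("SQLResult:"):
--             break
--         segment.append(line)
--
--     # Scan backwards for the last "SQLQuery:" line; the lines after it
--     # (already collected in `tail`) belong to the query.
--     tail = []
--     for line in reversed(segment):
--         if line.startswith("SQLQuery:"):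
--             parts = [line[len("SQLQuery:"):].strip()] + tail
--             query = " ".join(parts)
--             return query if query else None
--         tail = [line.strip()] + tail
--
--     return None
-- ===== Notes on version B (the rewrite author's own statement) =====
-- stated objective: alternative
-- what changed: Replaces A's single forward scan with mutable query/flag state by a two-phase decomposition: truncate at the first SQLResult: line, scan the truncated segment backwards for the last SQLQuery: line while collecting the stripped tail lines, then build the result with one join.
import Mathlib
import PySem

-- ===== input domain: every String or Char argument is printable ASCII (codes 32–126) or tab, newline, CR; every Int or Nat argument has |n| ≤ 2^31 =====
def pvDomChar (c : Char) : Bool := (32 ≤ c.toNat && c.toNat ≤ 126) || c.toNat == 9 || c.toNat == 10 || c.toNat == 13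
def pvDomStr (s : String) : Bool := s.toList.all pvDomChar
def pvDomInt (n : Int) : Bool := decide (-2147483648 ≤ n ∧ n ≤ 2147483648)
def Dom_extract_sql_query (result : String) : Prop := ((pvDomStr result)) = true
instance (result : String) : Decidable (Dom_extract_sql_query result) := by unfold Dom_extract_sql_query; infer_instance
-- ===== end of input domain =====

-- B re-derives the same query by a two-phase decomposition (truncate at first "SQLResult:" line, scan
-- backwards for the last "SQLQuery:" line, one join) instead of A's forward scan with mutable query/flag state.

-- ===== PORT A =====
-- A's for-loop with `query`/`reading_query` state and the `break` on "SQLResult:".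
def pvLoopA : List String → String → Bool → String
  | [], q, _ => q
  | l :: rest, q, r =>
    if PySem.Str.startswith l "SQLQuery:" then
      pvLoopA rest (PySem.Str.strip (PySem.Str.slice l (some 9) none)) true
    else if PySem.Str.startswith l "SQLResult:" then q
    else if r then pvLoopA rest (q ++ " " ++ PySem.Str.strip l) true
    else pvLoopA rest q false

def extract_sql_query (result : String) : Option String :=
  let q := pvLoopA ((PySem.Str.split? result "\n").getD []) "" false
  if q = "" then none else some q

-- ===== PORT B =====
-- Source B's first loop: collect lines until the first one starting with "SQLResult:".
def pvSegment : List String → List String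
  | [] => []
  | l :: rest =>
    if PySem.Str.startswith l "SQLResult:" then []
    else l :: pvSegment rest

-- Source B's second loop over `reversed(segment)`, accumulating `tail`; returns the parts list.
def pvScanBack : List String → List String → Option (List String)
  | [], _ => none
  | l :: rest, tail =>
    if PySem.Str.startswith l "SQLQuery:" then
      some (PySem.Str.strip (PySem.Str.slice l (some 9) none) :: tail)
    else pvScanBack rest (PySem.Str.strip l :: tail)

def extract_sql_query_alt (result : String) : Option String :=
  match pvScanBack (pvSegment ((PySem.Str.split? result "\n").getD [])).reverse [] with
  | none => none
  | some parts =>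
    let query := PySem.Str.join " " parts
    if query = "" then none else some query

-- ===== PRECONDITION & SPEC =====
def Spec_extract_sql_query (result : String) (out : Option String) : Prop := out = extract_sql_query_alt result
instance (result : String) (out : Option String) : Decidable (Spec_extract_sql_query result out) := by unfold Spec_extract_sql_query; infer_instance

-- ===== CLAIM (what is proved, stated in full; the proofs are below) =====
def Claim_equal_extract_sql_query : Prop := ∀ (result : String), Dom_extract_sql_query result → Spec_extract_sql_query result (extract_sql_query result)

-- ===== LEMMAS AND PROOFS =====

-- a line cannot start with both prefixes
lemma sw_disjoint (l : String) (h : PySem.Str.startswith l "SQLQuery:" = true) :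
    PySem.Str.startswith l "SQLResult:" = false := by
  by_contra hc
  rw [Bool.not_eq_false] at hc
  rw [PySem.Str.startswith_eq, PySem.Chars.startswith_iff] at h hc
  rcases List.prefix_or_prefix_of_prefix h hc with hp | hp
  · revert hp; decide
  · revert hp; decide

lemma scanBack_some {xs : List String} {t p : List String}
    (h : pvScanBack xs t = some p) (ys : List String) :
    pvScanBack (xs ++ ys) t = some p := by
  induction xs generalizing t with
  | nil => simp [pvScanBack] at h
  | cons l rest ih =>
    by_cases hq : PySem.Str.startswith l "SQLQuery:" = true
    · simp only [pvScanBack, hq, if_true] at h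
      simpa only [List.cons_append, pvScanBack, hq, if_true] using h
    · rw [Bool.not_eq_true] at hq
      simp only [pvScanBack, hq, Bool.false_eq_true, if_false] at h
      simp only [List.cons_append, pvScanBack, hq, Bool.false_eq_true, if_false]
      exact ih h

lemma scanBack_none {xs : List String} {t : List String}
    (h : pvScanBack xs t = none) (ys : List String) :
    pvScanBack (xs ++ ys) t = pvScanBack ys ((xs.map PySem.Str.strip).reverse ++ t) := by
  induction xs generalizing t with
  | nil => simp
  | cons l rest ih =>
    by_cases hq : PySem.Str.startswith l "SQLQuery:" = true
    · simp only [pvScanBack, hq, if_true] at h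
      exact absurd h (by simp)
    · rw [Bool.not_eq_true] at hq
      simp only [pvScanBack, hq, Bool.false_eq_true, if_false] at h
      simp only [List.cons_append, pvScanBack, hq, Bool.false_eq_true, if_false, List.map_cons,
        List.reverse_cons]
      rw [ih h, List.append_assoc]
      rfl

lemma foldl_append_shift (xs : List String) (a b : String) :
    xs.foldl (fun acc s => acc ++ " " ++ s) (a ++ " " ++ b)
      = a ++ " " ++ xs.foldl (fun acc s => acc ++ " " ++ s) b := by
  induction xs generalizing b with
  | nil => rfl
  | cons c xs ih =>
    simp only [List.foldl_cons]
    have he : (a ++ " " ++ b) ++ " " ++ c = a ++ " " ++ (b ++ " " ++ c) :=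
      String.toList_inj.mp (by simp)
    rw [he, ih]

-- " ".join(parts) equals A's `+=`-style fold
lemma join_eq_foldl (xs : List String) (a : String) :
    PySem.Str.join " " (a :: xs) = xs.foldl (fun acc s => acc ++ " " ++ s) a := by
  induction xs generalizing a with
  | nil =>
    apply String.toList_inj.mp
    simp [PySem.Chars.join_singleton]
  | cons b xs ih =>
    have h2 : PySem.Str.join " " (a :: b :: xs) = a ++ " " ++ PySem.Str.join " " (b :: xs) :=
      String.toList_inj.mp (by simp [PySem.Chars.join_cons_cons])
    rw [h2, ih b, List.foldl_cons, foldl_append_shift]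

-- the "reading_query = True" state of A's loop, characterized by B's backward scan of the segment
lemma loopA_true (ls : List String) (q : String) :
    pvLoopA ls q true =
      match pvScanBack (pvSegment ls).reverse [] with
      | none => (pvSegment ls).foldl (fun acc l => acc ++ " " ++ PySem.Str.strip l) q
      | some parts => PySem.Str.join " " parts := by
  induction ls generalizing q with
  | nil => simp [pvLoopA, pvSegment, pvScanBack]
  | cons l rest ih =>
    by_cases hq : PySem.Str.startswith l "SQLQuery:" = true
    · have hr := sw_disjoint l hq
      simp only [pvLoopA, pvSegment, hq, hr, if_true, Bool.false_eq_true, if_false,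
        List.reverse_cons]
      rw [ih]
      cases hsb : pvScanBack (pvSegment rest).reverse [] with
      | some p => rw [scanBack_some hsb]
      | none =>
        rw [scanBack_none hsb]
        simp only [pvScanBack, hq, if_true, List.map_reverse, List.reverse_reverse,
          List.append_nil]
        rw [join_eq_foldl, List.foldl_map]
    · rw [Bool.not_eq_true] at hq
      by_cases hr : PySem.Str.startswith l "SQLResult:" = true
      · simp only [pvLoopA, pvSegment, hq, hr, Bool.false_eq_true, if_false, if_true,
          List.reverse_nil, pvScanBack, List.foldl_nil]
      · rw [Bool.not_eq_true] at hr
        simp only [pvLoopA, pvSegment, hq, hr, Bool.false_eq_true, if_false, if_true,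
          List.reverse_cons]
        rw [ih]
        cases hsb : pvScanBack (pvSegment rest).reverse [] with
        | some p => rw [scanBack_some hsb]
        | none =>
          rw [scanBack_none hsb]
          simp only [pvScanBack, hq, Bool.false_eq_true, if_false, List.append_nil,
            List.foldl_cons]

-- the initial "reading_query = False" state
lemma loopA_false (ls : List String) (q : String) :
    pvLoopA ls q false =
      match pvScanBack (pvSegment ls).reverse [] with
      | none => q
      | some parts => PySem.Str.join " " parts := by
  induction ls generalizing q with
  | nil => simp [pvLoopA, pvSegment, pvScanBack]
  | cons l rest ih =>
    by_cases hq : PySem.Str.startswith l "SQLQuery:" = true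
    · have hr := sw_disjoint l hq
      simp only [pvLoopA, pvSegment, hq, hr, if_true, Bool.false_eq_true, if_false,
        List.reverse_cons]
      rw [loopA_true]
      cases hsb : pvScanBack (pvSegment rest).reverse [] with
      | some p => rw [scanBack_some hsb]
      | none =>
        rw [scanBack_none hsb]
        simp only [pvScanBack, hq, if_true, List.map_reverse, List.reverse_reverse,
          List.append_nil]
        rw [join_eq_foldl, List.foldl_map]
    · rw [Bool.not_eq_true] at hq
      by_cases hr : PySem.Str.startswith l "SQLResult:" = true
      · simp only [pvLoopA, pvSegment, hq, hr, Bool.false_eq_true, if_false, if_true,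
          List.reverse_nil, pvScanBack]
      · rw [Bool.not_eq_true] at hr
        simp only [pvLoopA, pvSegment, hq, hr, Bool.false_eq_true, if_false,
          List.reverse_cons]
        rw [ih]
        cases hsb : pvScanBack (pvSegment rest).reverse [] with
        | some p => rw [scanBack_some hsb]
        | none =>
          rw [scanBack_none hsb]
          simp only [pvScanBack, hq, Bool.false_eq_true, if_false, List.append_nil]

-- ===== VERDICT (by name: the statement is the Claim_ definition above) =====
theorem extract_sql_query_spec : Claim_equal_extract_sql_query := by
  intro result _
  unfold Spec_extract_sql_query extract_sql_query extract_sql_query_alt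
  rw [loopA_false]
  cases hsb : pvScanBack (pvSegment ((PySem.Str.split? result "\n").getD [])).reverse [] with
  | none => simp
  | some parts => simp
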